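-- pv_equiv track=rewrite | github.com/dimorry/kkn-data-model-algo-data-model-scraper | scraper.py | _extract_table_name_from_text
-- ===== SOURCE A (Python) =====
-- def _extract_table_name_from_text(text):
--     """Extract table name by finding the earliest delimiter position"""
--     # Find the earliest delimiter position
--     delimiters = [' ', '(', ')', '.', '\n', ';', ',', 'table', 'Table']
--     earliest_pos = len(text)  # Default to end of string
--
--     for delimiter in delimiters:
--         pos = text.find(delimiter)
--         if pos != -1 and pos < earliest_pos:
--             earliest_pos = pos
--
--     # Extract text up to the earliest delimiter
--     if earliest_pos < len(text):
--         text = text[:earliest_pos]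
--
--     return text.strip()
-- ===== SOURCE B (Python) =====
-- def _extract_table_name_from_text(text):
--     """Extract table name by a single left-to-right scan for the earliest delimiter start"""
--     singles = ' ().\n;,'
--     pos = len(text)
--     for i in range(len(text)):
--         if text[i] in singles or text.startswith('table', i) or text.startswith('Table', i):
--             pos = i
--             break
--     return text[:pos].strip()
-- ===== Notes on version B (the rewrite author's own statement) =====
-- stated objective: alternative
-- what changed: A runs nine separate find passes (one per delimiter) and takes the minimum position; B does a single left-to-right scan stopping at the first position where any delimiter starts.
import Mathlib
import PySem

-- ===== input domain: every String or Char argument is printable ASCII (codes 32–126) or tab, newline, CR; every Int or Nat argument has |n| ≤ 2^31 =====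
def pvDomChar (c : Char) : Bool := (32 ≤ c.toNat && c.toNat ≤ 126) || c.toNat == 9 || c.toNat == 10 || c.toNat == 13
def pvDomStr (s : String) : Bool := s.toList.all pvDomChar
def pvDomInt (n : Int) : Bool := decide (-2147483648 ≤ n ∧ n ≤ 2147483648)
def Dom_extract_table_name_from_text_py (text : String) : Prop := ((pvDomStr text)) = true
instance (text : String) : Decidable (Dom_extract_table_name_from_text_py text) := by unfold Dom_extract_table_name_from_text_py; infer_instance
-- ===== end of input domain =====

-- B replaces A's nine separate `find` passes (one per delimiter, taking the minimum
-- position) by a single left-to-right scan that stops at the first position where any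
-- delimiter starts; same return value, different algorithm (objective: alternative).

-- ===== PORT A =====
def extract_table_name_from_text_py (text : String) : String :=
  let delimiters : List String := [" ", "(", ")", ".", "\n", ";", ",", "table", "Table"]
  let earliest_pos : Int :=
    delimiters.foldl (fun earliest_pos delimiter =>
      let pos := PySem.Str.find text delimiter
      if pos ≠ -1 ∧ pos < earliest_pos then pos else earliest_pos)
      (PySem.Str.len text)
  let text := if earliest_pos < PySem.Str.len text
              then PySem.Str.slice text none (some earliest_pos) else text
  PySem.Str.strip text

-- ===== PORT B =====
-- the single-character delimiters of Source B's `singles`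
def pvSingles : List Char := [' ', '(', ')', '.', '\n', ';', ',']

-- Source B's scan loop: first index whose suffix starts with a delimiter (none if no hit)
def pvScan : List Char → Option Nat
  | [] => none
  | c :: rest =>
      if c ∈ pvSingles
         || PySem.Chars.startswith (c :: rest) "table".toList
         || PySem.Chars.startswith (c :: rest) "Table".toList
      then some 0
      else (pvScan rest).map (· + 1)

def extract_table_name_from_text_py_alt (text : String) : String :=
  let cs := text.toList
  let pos := (pvScan cs).getD cs.length
  PySem.Str.strip (String.ofList (cs.take pos))

-- ===== PRECONDITION & SPEC =====
def Spec_extract_table_name_from_text_py (text : String) (out : String) : Prop := out = extract_table_name_from_text_py_alt text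
instance (text : String) (out : String) : Decidable (Spec_extract_table_name_from_text_py text out) := by unfold Spec_extract_table_name_from_text_py; infer_instance

-- ===== CLAIM (what is proved, stated in full; the proofs are below) =====
def Claim_equal_extract_table_name_from_text_py : Prop := ∀ (text : String), Dom_extract_table_name_from_text_py text → Spec_extract_table_name_from_text_py text (extract_table_name_from_text_py text)

-- ===== LEMMAS AND PROOFS =====

-- A's delimiter list, on the `List Char` side (proof-side mirror of the port's literal)
def pvDelims : List (List Char) :=
  [" ".toList, "(".toList, ")".toList, ".".toList, "\n".toList, ";".toList, ",".toList,
   "table".toList, "Table".toList]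

-- "some delimiter starts at position i of cs"
def pvHit (cs : List Char) (i : Nat) : Prop := ∃ d ∈ pvDelims, d <+: cs.drop i

lemma pvDelims_ne_nil : ∀ d ∈ pvDelims, d ≠ [] := by decide

lemma pvHit_lt_length {cs : List Char} {i : Nat} (h : pvHit cs i) : i < cs.length := by
  obtain ⟨d, hd, hp⟩ := h
  by_contra hge
  rw [List.drop_eq_nil_of_le (by omega)] at hp
  exact pvDelims_ne_nil d hd (List.prefix_nil.mp hp)

lemma pvHit_cons_succ (c : Char) (rest : List Char) (i : Nat) :
    pvHit (c :: rest) (i + 1) ↔ pvHit rest i := by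
  simp [pvHit, List.drop_succ_cons]

lemma pvHit_zero_iff (c : Char) (rest : List Char) :
    (c ∈ pvSingles
      || PySem.Chars.startswith (c :: rest) "table".toList
      || PySem.Chars.startswith (c :: rest) "Table".toList) = true ↔ pvHit (c :: rest) 0 := by
  simp only [Bool.or_eq_true, decide_eq_true_eq, PySem.Chars.startswith_iff]
  constructor
  · rintro ((hc | hc) | hc)
    · simp only [pvSingles, List.mem_cons, List.not_mem_nil, or_false] at hc
      rcases hc with h | h | h | h | h | h | h <;> subst h
      · exact ⟨[' '], by simp [pvDelims], by simp [List.cons_prefix_cons]⟩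
      · exact ⟨['('], by simp [pvDelims], by simp [List.cons_prefix_cons]⟩
      · exact ⟨[')'], by simp [pvDelims], by simp [List.cons_prefix_cons]⟩
      · exact ⟨['.'], by simp [pvDelims], by simp [List.cons_prefix_cons]⟩
      · exact ⟨['\n'], by simp [pvDelims], by simp [List.cons_prefix_cons]⟩
      · exact ⟨[';'], by simp [pvDelims], by simp [List.cons_prefix_cons]⟩
      · exact ⟨[','], by simp [pvDelims], by simp [List.cons_prefix_cons]⟩
    · exact ⟨"table".toList, by simp [pvDelims], by simpa using hc⟩
    · exact ⟨"Table".toList, by simp [pvDelims], by simpa using hc⟩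
  · rintro ⟨d, hd, hp⟩
    simp only [pvDelims, List.mem_cons, List.not_mem_nil, or_false] at hd
    rcases hd with h | h | h | h | h | h | h | h | h <;> subst h <;>
      simp_all [List.cons_prefix_cons, pvSingles, eq_comm]

-- unfold pvScan on a cons through the hit predicate
lemma pvScan_cons_pos (c : Char) (rest : List Char) (h : pvHit (c :: rest) 0) :
    pvScan (c :: rest) = some 0 := by
  simp only [pvScan]
  rw [if_pos ((pvHit_zero_iff c rest).mpr h)]

lemma pvScan_cons_neg (c : Char) (rest : List Char) (h : ¬ pvHit (c :: rest) 0) :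
    pvScan (c :: rest) = (pvScan rest).map (· + 1) := by
  simp only [pvScan]
  rw [if_neg (fun hb => h ((pvHit_zero_iff c rest).mp hb))]

-- pvScan computes the least hit position (or none)
lemma pvScan_spec (cs : List Char) :
    (∀ j, pvScan cs = some j → pvHit cs j ∧ ∀ i < j, ¬ pvHit cs i) ∧
    (pvScan cs = none → ∀ i, ¬ pvHit cs i) := by
  induction cs with
  | nil =>
    refine ⟨by simp [pvScan], fun _ i => ?_⟩
    intro h; exact absurd (pvHit_lt_length h) (by simp)
  | cons c rest ih =>
    by_cases hhit : pvHit (c :: rest) 0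
    · refine ⟨fun j hj => ?_, fun hn => ?_⟩
      · rw [pvScan_cons_pos c rest hhit] at hj
        cases hj
        exact ⟨hhit, by omega⟩
      · rw [pvScan_cons_pos c rest hhit] at hn
        cases hn
    · refine ⟨fun j hj => ?_, fun hn i => ?_⟩
      · rw [pvScan_cons_neg c rest hhit, Option.map_eq_some_iff] at hj
        obtain ⟨j', hj', rfl⟩ := hj
        obtain ⟨h1, h2⟩ := ih.1 j' hj'
        refine ⟨(pvHit_cons_succ c rest j').mpr h1, fun i hi => ?_⟩
        cases i with
        | zero => exact fun h => hhit h
        | succ i' => exact fun h => h2 i' (by omega) ((pvHit_cons_succ c rest i').mp h)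
      · rw [pvScan_cons_neg c rest hhit, Option.map_eq_none_iff] at hn
        cases i with
        | zero => exact fun h => hhit h
        | succ i' => exact fun h => ih.2 hn i' ((pvHit_cons_succ c rest i').mp h)

-- A's fold is a running minimum over the delimiters whose find succeeded
lemma pvFold_spec (cs : List Char) (ds : List (List Char)) (acc : Int) :
    (ds.foldl (fun e d =>
        let pos := PySem.Chars.find cs d
        if pos ≠ -1 ∧ pos < e then pos else e) acc = acc ∨
      ∃ d ∈ ds, 0 ≤ PySem.Chars.find cs d ∧
        ds.foldl (fun e d =>
          let pos := PySem.Chars.find cs d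
          if pos ≠ -1 ∧ pos < e then pos else e) acc = PySem.Chars.find cs d) ∧
    ds.foldl (fun e d =>
        let pos := PySem.Chars.find cs d
        if pos ≠ -1 ∧ pos < e then pos else e) acc ≤ acc ∧
    ∀ d ∈ ds, 0 ≤ PySem.Chars.find cs d →
      ds.foldl (fun e d =>
        let pos := PySem.Chars.find cs d
        if pos ≠ -1 ∧ pos < e then pos else e) acc ≤ PySem.Chars.find cs d := by
  induction ds generalizing acc with
  | nil => simp
  | cons d ds ih =>
    simp only [List.foldl_cons]
    set acc' := (fun e d =>
        let pos := PySem.Chars.find cs d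
        if pos ≠ -1 ∧ pos < e then pos else e) acc d with hacc'
    obtain ⟨h1, h2, h3⟩ := ih acc'
    have hle : acc' ≤ acc ∧ (acc' = acc ∨ (0 ≤ PySem.Chars.find cs d ∧ acc' = PySem.Chars.find cs d)) ∧
        (0 ≤ PySem.Chars.find cs d → acc' ≤ PySem.Chars.find cs d) := by
      rw [hacc']
      simp only
      split_ifs with h
      · have := PySem.Chars.neg_one_le_find cs d
        exact ⟨by omega, Or.inr ⟨by omega, rfl⟩, by omega⟩
      · rw [not_and_or, not_not] at h
        have := PySem.Chars.neg_one_le_find cs d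
        refine ⟨le_refl _, Or.inl rfl, fun h0 => ?_⟩
        rcases h with h | h <;> omega
    refine ⟨?_, le_trans h2 hle.1, ?_⟩
    · rcases h1 with h1 | ⟨d', hd', h0, he⟩
      · rcases hle.2.1 with h | ⟨h0, he⟩
        · exact Or.inl (h1.trans h)
        · exact Or.inr ⟨d, List.mem_cons_self .., ⟨h0, h1.trans he⟩⟩
      · exact Or.inr ⟨d', List.mem_cons_of_mem _ hd', h0, he⟩
    · intro d' hd' h0
      rcases List.mem_cons.mp hd' with rfl | hmem
      · exact le_trans h2 (hle.2.2 h0)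
      · exact h3 d' hmem h0

-- if some delimiter hits somewhere, its find is the least hit with that delimiter
lemma pvFind_of_hit {cs d : List Char} {j : Nat} (hp : d <+: cs.drop j) :
    0 ≤ PySem.Chars.find cs d ∧ (PySem.Chars.find cs d).toNat ≤ j := by
  have hin : PySem.Chars.isIn d cs = true :=
    (PySem.Chars.exists_prefix_drop_iff_isIn d cs).mp ⟨j, hp⟩
  have hne : PySem.Chars.find cs d ≠ -1 :=
    (PySem.Chars.find_ne_neg_one_iff cs d).mpr ((PySem.Chars.isIn_iff_infix d cs).mp hin)
  have h0 : 0 ≤ PySem.Chars.find cs d := by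
    have := PySem.Chars.neg_one_le_find cs d; omega
  refine ⟨h0, ?_⟩
  by_contra hgt
  exact (PySem.Chars.find_spec h0).2 j (by omega) hp

-- the core equality: A's earliest position (as a Nat) is B's scan result
lemma pvEarliest_eq_scan (cs : List Char) :
    (pvDelims.foldl (fun e d =>
        let pos := PySem.Chars.find cs d
        if pos ≠ -1 ∧ pos < e then pos else e) (cs.length : Int)).toNat
      = (pvScan cs).getD cs.length := by
  set E := pvDelims.foldl (fun e d =>
      let pos := PySem.Chars.find cs d
      if pos ≠ -1 ∧ pos < e then pos else e) (cs.length : Int) with hE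
  obtain ⟨h1, h2, h3⟩ := pvFold_spec cs pvDelims (cs.length : Int)
  rw [← hE] at h1 h2 h3
  have hE0 : 0 ≤ E := by
    rcases h1 with h | ⟨d, _, h0, he⟩
    · omega
    · omega
  cases hscan : pvScan cs with
  | none =>
    have hnone := (pvScan_spec cs).2 hscan
    have : E = (cs.length : Int) := by
      rcases h1 with h | ⟨d, hd, h0, he⟩
      · exact h
      · exfalso
        have hsp := (PySem.Chars.find_spec h0).1
        exact hnone _ ⟨d, hd, hsp⟩
    simp [this]
  | some j =>
    obtain ⟨⟨d, hd, hp⟩, hmin⟩ := (pvScan_spec cs).1 j hscan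
    obtain ⟨h0, hle⟩ := pvFind_of_hit hp
    -- find d points at a hit at or before j, so E ≤ find d ≤ j
    have hEle : E ≤ (j : Int) := by
      have := h3 d hd h0
      omega
    have hjE : j ≤ E.toNat := by
      rcases h1 with h | ⟨d', hd', h0', he⟩
      · have hjlt : j < cs.length := pvHit_lt_length ⟨d, hd, hp⟩
        omega
      · have hsp := (PySem.Chars.find_spec h0').1
        have : ¬ (E.toNat < j) := fun hlt => hmin E.toNat hlt ⟨d', hd', by rwa [he]⟩
        omega
    simp only [Option.getD_some]
    omega

-- ===== VERDICT (by name: the statement is the Claim_ definition above) =====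
theorem extract_table_name_from_text_py_spec : Claim_equal_extract_table_name_from_text_py := by
  intro text _
  unfold Spec_extract_table_name_from_text_py
  unfold extract_table_name_from_text_py extract_table_name_from_text_py_alt
  simp only [PySem.Str.find_eq, PySem.Str.len_eq]
  set cs := text.toList with hcs
  have hkey := pvEarliest_eq_scan cs
  set E := pvDelims.foldl (fun e d =>
      let pos := PySem.Chars.find cs d
      if pos ≠ -1 ∧ pos < e then pos else e) (cs.length : Int) with hEdef
  -- identify A's fold (over String delimiters) with E (over pvDelims)
  have hsame : (([" ", "(", ")", ".", "\n", ";", ",", "table", "Table"] : List String).foldl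
      (fun e d =>
        let pos := PySem.Chars.find text.toList d.toList
        if pos ≠ -1 ∧ pos < e then pos else e) ((text.toList.length : Int))) = E := by
    rw [hEdef, hcs]
    rfl
  rw [hsame]
  obtain ⟨h1, h2, _⟩ := pvFold_spec cs pvDelims (cs.length : Int)
  rw [← hEdef] at h1 h2
  have hE0 : 0 ≤ E := by
    rcases h1 with h | ⟨d, _, h0, he⟩ <;> omega
  apply String.ext
  by_cases hlt : E < (cs.length : Int)
  · rw [if_pos (by rwa [hcs] at hlt)]
    simp only [PySem.Str.toList_strip, PySem.Str.toList_slice, PySem.Chars.slice_eq_listSlice, String.toList_ofList]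
    rw [PySem.List.slice_to _ hE0]
    rw [← hcs, hkey]
  · rw [if_neg (by rwa [hcs] at hlt)]
    have hEn : E = (cs.length : Int) := by omega
    have : (pvScan cs).getD cs.length = cs.length := by
      rw [← hkey, hEn]; simp
    simp only [PySem.Str.toList_strip, this, String.toList_ofList]
    rw [← hcs, List.take_length]
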